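-- pv_equiv track=rewrite | github.com/egdman/cdx | cparse.py | no_preproc
-- ===== SOURCE A (Python) =====
-- def no_preproc(tokens):
--   tokens = iter(tokens)
--
--   def preproc_state():
--     for t in tokens:
--       if t == "\n":
--         return
--       elif t == "\\":
--         for t in tokens:
--           break
--
--   for t in tokens:
--     if t == "#":
--       preproc_state()
--     else:
--       yield t
-- ===== SOURCE B (Python) =====
-- def no_preproc(tokens):
--   in_preproc = False
--   skip_next = False
--   for t in tokens:
--     if skip_next:
--       skip_next = False
--       continue
--     if in_preproc:
--       if t == "\n":
--         in_preproc = False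
--       elif t == "\\":
--         skip_next = True
--     elif t == "#":
--       in_preproc = True
--     else:
--       yield t
-- ===== Notes on version B (the rewrite author's own statement) =====
-- stated objective: simpler
-- what changed: Replaced A's nested generator-helper (an inner loop that steals from a shared iterator, with a second inner loop to skip one token) by a single flat loop over the tokens maintaining two boolean flags in_preproc and skip_next.
import Mathlib
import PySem

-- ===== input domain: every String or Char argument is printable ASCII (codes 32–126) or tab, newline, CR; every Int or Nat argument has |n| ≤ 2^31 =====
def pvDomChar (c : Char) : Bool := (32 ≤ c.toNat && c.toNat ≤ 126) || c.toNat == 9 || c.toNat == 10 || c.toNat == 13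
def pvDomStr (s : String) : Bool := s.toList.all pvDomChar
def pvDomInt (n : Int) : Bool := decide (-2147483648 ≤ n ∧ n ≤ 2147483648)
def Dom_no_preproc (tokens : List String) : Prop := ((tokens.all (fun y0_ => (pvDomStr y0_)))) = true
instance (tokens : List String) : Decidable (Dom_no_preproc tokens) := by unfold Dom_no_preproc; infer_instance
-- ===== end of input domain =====

-- B replaces A's nested generator-helper with one flat loop over two boolean state
-- flags (in_preproc, skip_next); objective: simpler decomposition, same cost.
-- Both are Python generators; equivalence is about the list of yielded values.

-- ===== PORT A =====
-- A's inner helper `preproc_state`: consumes tokens until '\n' (inclusive);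
-- on '\\' it unconditionally consumes one extra token; returns the remaining stream.
def preprocState : List String → List String
  | [] => []
  | t :: rest =>
    if t = "\n" then rest
    else if t = "\\" then
      match rest with
      | [] => []
      | _ :: r => preprocState r
    else preprocState rest

theorem preprocState_length_le (ts : List String) : (preprocState ts).length ≤ ts.length := by
  match ts with
  | [] => simp [preprocState]
  | t :: rest =>
    rw [preprocState.eq_def]
    by_cases h1 : t = "\n"
    · simp [h1]
    · by_cases h2 : t = "\\"
      · match rest with
        | [] => simp [h2]
        | x :: r =>
          have := preprocState_length_le r
          simp [h2]
          omega
      · have := preprocState_length_le rest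
        simp [h1, h2]
        omega
termination_by ts.length

def no_preproc (tokens : List String) : List String :=
  match tokens with
  | [] => []
  | t :: rest =>
    if t = "#" then no_preproc (preprocState rest)
    else t :: no_preproc rest
termination_by tokens.length
decreasing_by
  · have := preprocState_length_le rest; simp; omega
  · simp

-- ===== PORT B =====
-- B's single loop with state flags in_preproc and skip_next.
def altLoop : Bool → Bool → List String → List String
  | _, _, [] => []
  | inp, skip, t :: rest =>
    if skip then altLoop inp false rest
    else if inp then
      if t = "\n" then altLoop false false rest
      else if t = "\\" then altLoop true true rest
      else altLoop true false rest
    else if t = "#" then altLoop true false rest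
    else t :: altLoop false false rest

def no_preproc_alt (tokens : List String) : List String :=
  altLoop false false tokens

-- ===== PRECONDITION & SPEC =====
def Spec_no_preproc (tokens : List String) (out : List String) : Prop := out = no_preproc_alt tokens
instance (tokens : List String) (out : List String) : Decidable (Spec_no_preproc tokens out) := by unfold Spec_no_preproc; infer_instance

-- ===== CLAIM (what is proved, stated in full; the proofs are below) =====
def Claim_equal_no_preproc : Prop := ∀ (tokens : List String), Dom_no_preproc tokens → Spec_no_preproc tokens (no_preproc tokens)

-- ===== LEMMAS AND PROOFS =====

-- invariant: B's loop in state (true,false) equals A resumed after its helper,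
-- and in state (false,false) equals A itself.  Strong induction on length.
theorem altLoop_main : ∀ (n : ℕ) (ts : List String), ts.length ≤ n →
    altLoop true false ts = no_preproc (preprocState ts) ∧
    altLoop false false ts = no_preproc ts := by
  intro n
  induction n with
  | zero =>
      intro ts h
      have : ts = [] := List.length_eq_zero_iff.mp (Nat.le_zero.mp h)
      subst this
      simp [altLoop, preprocState, no_preproc]
  | succ n ih =>
      intro ts h
      match ts with
      | [] => simp [altLoop, preprocState, no_preproc]
      | t :: rest =>
        have hr : rest.length ≤ n := by simpa using Nat.lt_succ_iff.mp (by simpa using h)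
        constructor
        · rw [preprocState.eq_def]
          by_cases h1 : t = "\n"
          · subst h1
            simp [altLoop, (ih rest hr).2]
          · by_cases h2 : t = "\\"
            · subst h2
              match rest with
              | [] => simp [altLoop, no_preproc]
              | x :: r =>
                have hr2 : r.length ≤ n := by simp at hr; omega
                simp [altLoop, (ih r hr2).1]
            · simp [altLoop, h1, h2, (ih rest hr).1]
        · by_cases h3 : t = "#"
          · subst h3
            simp [altLoop, no_preproc, (ih rest hr).1]
          · simp [altLoop, no_preproc, h3, (ih rest hr).2]

-- ===== VERDICT (by name: the statement is the Claim_ definition above) =====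
theorem no_preproc_spec : Claim_equal_no_preproc := by
  intro tokens _
  unfold Spec_no_preproc no_preproc_alt
  exact ((altLoop_main tokens.length tokens le_rfl).2).symm
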